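-- pv_equiv track=rewrite | github.com/katerinawang/AdventOfCode | day1/Calibration/calibration.py | first_num_string
-- ===== SOURCE A (Python) =====
-- def first_num_string(s):
--     num = 0
--     for i, c in enumerate(s):
--         i += 1
--         if not c.isdigit():
--             if "one" in s[0:i] or "eno" in s[0:i]:
--                 num = 1
--                 break
--             if "two" in s[0:i] or "owt" in s[0:i]:
--                 num = 2
--                 break
--             if "three" in s[0:i] or "eerht" in s[0:i]:
--                 num = 3
--                 break
--             if "four" in s[0:i] or "ruof" in s[0:i]:
--                 num = 4
--                 break
--             if "five" in s[0:i] or "evif" in s[0:i]: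
--                 num = 5
--                 break
--             if "six" in s[0:i] or "xis" in s[0:i]:
--                 num = 6
--                 break
--             if "seven" in s[0:i] or "neves" in s[0:i]:
--                 num = 7
--                 break
--             if "eight" in s[0:i] or "thgie" in s[0:i]:
--                 num = 8
--                 break
--             if "nine" in s[0:i] or "enin" in s[0:i]:
--                 num = 9
--                 break
--         else:
--             num = int(c)
--             break
--     return num
-- ===== SOURCE B (Python) =====
-- TOKENS = [("one", 1), ("eno", 1), ("two", 2), ("owt", 2), ("three", 3), ("eerht", 3),
--           ("four", 4), ("ruof", 4), ("five", 5), ("evif", 5), ("six", 6), ("xis", 6),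
--           ("seven", 7), ("neves", 7), ("eight", 8), ("thgie", 8), ("nine", 9), ("enin", 9)]
--
--
-- def first_num_string(s):
--     # One event per token: the step at which its first occurrence completes
--     # (find index + length); one event for the first digit char.  The answer
--     # is the value of the lexicographically smallest (step, value) event.
--     best = None
--     for i, c in enumerate(s):
--         if c.isdigit():
--             best = (i + 1, int(c))
--             break
--     for t, v in TOKENS:
--         j = s.find(t)
--         if j != -1:
--             cand = (j + len(t), v)
--             if best is None or cand < best:
--                 best = cand
--     return best[1] if best is not None else 0
-- ===== Notes on version B (the rewrite author's own statement) =====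
-- stated objective: faster
-- what changed: Replaces the prefix rescan (for each position, substring-search all 18 tokens in the growing prefix) by one str.find per token: each token yields a single (completion step, value) event and the answer is the value of the lexicographically smallest event, with the first digit as its own event.
import Mathlib
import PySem

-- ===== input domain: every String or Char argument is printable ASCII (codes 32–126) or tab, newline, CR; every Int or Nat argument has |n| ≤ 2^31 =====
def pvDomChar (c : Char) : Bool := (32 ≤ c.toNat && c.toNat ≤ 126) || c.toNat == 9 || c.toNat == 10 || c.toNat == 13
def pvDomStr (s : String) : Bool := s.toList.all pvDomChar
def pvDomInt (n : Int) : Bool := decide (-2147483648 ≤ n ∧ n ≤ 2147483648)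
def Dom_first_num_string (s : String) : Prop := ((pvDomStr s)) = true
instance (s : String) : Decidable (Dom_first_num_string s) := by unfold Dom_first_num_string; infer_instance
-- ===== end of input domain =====

-- B replaces A's quadratic per-position prefix rescan by one str.find per token
-- (each token becomes a single (completion step, value) event; the answer is the
-- value of the lexicographically least event): objective = faster.

-- ===== PORT A =====
-- int(c) on a single digit char; isdigit guarantees ofStr? succeeds, getD 0 unreachable
def fnsDigitValA (c : Char) : Int := (PySem.Int.ofStr? (String.ofList [c])).getD 0

def fnsGoA (s : String) : List (Int × Char) → Int
  | [] => 0
  | (i, c) :: rest =>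
    let i := i + 1
    if PySem.Chars.isdigit c = false then
      if PySem.Str.isIn "one" (PySem.Str.slice s (some 0) (some i)) ||
         PySem.Str.isIn "eno" (PySem.Str.slice s (some 0) (some i)) then 1
      else if PySem.Str.isIn "two" (PySem.Str.slice s (some 0) (some i)) ||
         PySem.Str.isIn "owt" (PySem.Str.slice s (some 0) (some i)) then 2
      else if PySem.Str.isIn "three" (PySem.Str.slice s (some 0) (some i)) ||
         PySem.Str.isIn "eerht" (PySem.Str.slice s (some 0) (some i)) then 3
      else if PySem.Str.isIn "four" (PySem.Str.slice s (some 0) (some i)) ||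
         PySem.Str.isIn "ruof" (PySem.Str.slice s (some 0) (some i)) then 4
      else if PySem.Str.isIn "five" (PySem.Str.slice s (some 0) (some i)) ||
         PySem.Str.isIn "evif" (PySem.Str.slice s (some 0) (some i)) then 5
      else if PySem.Str.isIn "six" (PySem.Str.slice s (some 0) (some i)) ||
         PySem.Str.isIn "xis" (PySem.Str.slice s (some 0) (some i)) then 6
      else if PySem.Str.isIn "seven" (PySem.Str.slice s (some 0) (some i)) ||
         PySem.Str.isIn "neves" (PySem.Str.slice s (some 0) (some i)) then 7
      else if PySem.Str.isIn "eight" (PySem.Str.slice s (some 0) (some i)) ||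
         PySem.Str.isIn "thgie" (PySem.Str.slice s (some 0) (some i)) then 8
      else if PySem.Str.isIn "nine" (PySem.Str.slice s (some 0) (some i)) ||
         PySem.Str.isIn "enin" (PySem.Str.slice s (some 0) (some i)) then 9
      else fnsGoA s rest
    else fnsDigitValA c

def first_num_string (s : String) : Int :=
  fnsGoA s (PySem.List.enumerate s.toList)

-- ===== PORT B =====
def fnsTokens : List (String × Int) :=
  [("one", 1), ("eno", 1), ("two", 2), ("owt", 2), ("three", 3), ("eerht", 3),
   ("four", 4), ("ruof", 4), ("five", 5), ("evif", 5), ("six", 6), ("xis", 6),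
   ("seven", 7), ("neves", 7), ("eight", 8), ("thgie", 8), ("nine", 9), ("enin", 9)]

-- int(c) on a single digit char (B's copy)
def fnsDigitValB (c : Char) : Int := (PySem.Int.ofStr? (String.ofList [c])).getD 0

-- first loop of Source B: first digit char as an event (i + 1, int(c))
def fnsDigitScan : List (Int × Char) → Option (Int × Int)
  | [] => none
  | (i, c) :: rest =>
    if PySem.Chars.isdigit c then some (i + 1, fnsDigitValB c) else fnsDigitScan rest

-- Python tuple comparison cand < best on (Int, Int)
def fnsLexLt (a b : Int × Int) : Bool := a.1 < b.1 || (a.1 == b.1 && a.2 < b.2)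

def fnsUpd (best : Option (Int × Int)) (cand : Int × Int) : Option (Int × Int) :=
  match best with
  | none => some cand
  | some b => if fnsLexLt cand b then some cand else some b

-- second loop of Source B: j = s.find(t); event (j + len(t), v) when j != -1
def fnsTokStep (s : String) (best : Option (Int × Int)) (tv : String × Int) :
    Option (Int × Int) :=
  if PySem.Str.find s tv.1 ≠ -1 then
    fnsUpd best (PySem.Str.find s tv.1 + PySem.Str.len tv.1, tv.2)
  else best

def first_num_string_alt (s : String) : Int :=
  match fnsTokens.foldl (fnsTokStep s) (fnsDigitScan (PySem.List.enumerate s.toList)) with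
  | some b => b.2
  | none => 0

-- ===== PRECONDITION & SPEC =====
def Spec_first_num_string (s : String) (out : Int) : Prop := out = first_num_string_alt s
instance (s : String) (out : Int) : Decidable (Spec_first_num_string s out) := by unfold Spec_first_num_string; infer_instance

-- ===== CLAIM (what is proved, stated in full; the proofs are below) =====
def Claim_equal_first_num_string : Prop := ∀ (s : String), Dom_first_num_string s → Spec_first_num_string s (first_num_string s)


-- ===== LEMMAS AND PROOFS =====

-- lexicographic order on events (Prop form of Python's tuple <=)
def fnsLexLe (a b : Int × Int) : Prop := a.1 < b.1 ∨ (a.1 = b.1 ∧ a.2 ≤ b.2)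

-- A's if-chain as a first-match scan over the nine groups (word, reversed word, value)
def fnsGroups : List (String × String × Int) :=
  [("one", "eno", 1), ("two", "owt", 2), ("three", "eerht", 3), ("four", "ruof", 4),
   ("five", "evif", 5), ("six", "xis", 6), ("seven", "neves", 7), ("eight", "thgie", 8),
   ("nine", "enin", 9)]

def fnsGrpFind (pre : String) : List (String × String × Int) → Option Int
  | [] => none
  | g :: gs =>
    if PySem.Str.isIn g.1 pre || PySem.Str.isIn g.2.1 pre then some g.2.2
    else fnsGrpFind pre gs

-- ---- token facts (decided on the literal lists) ----

theorem tok_ne_nil : ∀ p ∈ fnsTokens, p.1.toList ≠ [] := by decide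

theorem tok_nondigit : ∀ p ∈ fnsTokens, p.1.toList.all (fun c => !PySem.Chars.isdigit c) := by
  decide

theorem tok_of_grp : ∀ g ∈ fnsGroups, (g.1, g.2.2) ∈ fnsTokens ∧ (g.2.1, g.2.2) ∈ fnsTokens := by
  decide

theorem grp_of_tok : ∀ p ∈ fnsTokens, ∃ g ∈ fnsGroups, (p.1 = g.1 ∨ p.1 = g.2.1) ∧ p.2 = g.2.2 := by
  decide

theorem grp_pairwise : fnsGroups.Pairwise (fun a b => a.2.2 ≤ b.2.2) := by decide

-- ---- the infix-of-prefix characterisation via find ----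

theorem infix_take_iff (t l : List Char) (i : Nat) :
    t <:+: l.take i ↔
      0 ≤ PySem.Chars.find l t ∧ (PySem.Chars.find l t).toNat + t.length ≤ i := by
  constructor
  · rintro ⟨u, v, huv⟩
    have hinf : t <:+: l :=
      List.IsInfix.trans ⟨u, v, huv⟩ (List.take_prefix i l).isInfix
    have hf0 : 0 ≤ PySem.Chars.find l t := (PySem.Chars.find_nonneg_iff l t).2 hinf
    have hspec := PySem.Chars.find_spec hf0
    have hul : u.length ≤ (l.take i).length := by
      rw [← huv]; simp
    have hdrop : t <+: l.drop u.length := by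
      have h2 : l.drop u.length = (l.take i).drop u.length ++ l.drop i := by
        conv_lhs => rw [← List.take_append_drop i l]
        rw [List.drop_append_of_le_length hul]
      have h1 : (l.take i).drop u.length = t ++ v := by
        rw [← huv, List.append_assoc, List.drop_left]
      rw [h2, h1]
      exact ⟨v ++ l.drop i, by simp⟩
    have hmin : (PySem.Chars.find l t).toNat ≤ u.length := by
      by_contra hcon
      rw [not_le] at hcon
      exact hspec.2 u.length hcon hdrop
    have hlen : u.length + t.length ≤ i := by
      have hlc := congrArg List.length huv
      simp [List.length_take] at hlc
      omega
    exact ⟨hf0, by omega⟩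
  · rintro ⟨hf0, hle⟩
    obtain ⟨w, hw⟩ := (PySem.Chars.find_spec hf0).1
    set f := (PySem.Chars.find l t).toNat with hfdef
    have hfi : f ≤ i := by omega
    have hsplit : l.take i = l.take f ++ (l.drop f).take (i - f) := by
      rw [← List.take_add]
      congr 1
      omega
    have ht : (l.drop f).take (i - f) = t ++ w.take (i - f - t.length) := by
      rw [← hw, List.take_append]
      congr 1
      rw [List.take_of_length_le]
      omega
    exact ⟨l.take f, w.take (i - f - t.length), by rw [hsplit, ht]; simp⟩

-- string-level form, positions as Int
theorem infix_take_iff' (s t : String) (i : Nat) :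
    t.toList <:+: s.toList.take i ↔
      (PySem.Str.find s t ≠ -1 ∧ PySem.Str.find s t + PySem.Str.len t ≤ (i : Int)) := by
  rw [PySem.Str.find_eq, PySem.Str.len_eq, infix_take_iff t.toList s.toList i]
  have hge := PySem.Chars.neg_one_le_find s.toList t.toList
  constructor
  · rintro ⟨h0, hle⟩
    refine ⟨by omega, ?_⟩
    omega
  · rintro ⟨hne, hle⟩
    have h0 : 0 ≤ PySem.Chars.find s.toList t.toList := by omega
    refine ⟨h0, ?_⟩
    omega

-- ---- digit-scan lemmas ----

theorem ds_none (xs : List Char) (st : Int)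
    (h : ∀ c ∈ xs, PySem.Chars.isdigit c = false) :
    fnsDigitScan (PySem.List.enumerate xs st) = none := by
  induction xs generalizing st with
  | nil => rfl
  | cons c rest ih =>
    show fnsDigitScan ((st, c) :: PySem.List.enumerate rest (st + 1)) = none
    rw [fnsDigitScan]
    rw [if_neg (by simp [h c List.mem_cons_self])]
    exact ih (st + 1) (fun c' hc' => h c' (List.mem_cons_of_mem _ hc'))

theorem ds_first (xs : List Char) (st : Int) (d : Nat) (hd : d < xs.length)
    (hbefore : ∀ j (hj : j < d) (hjl : j < xs.length), PySem.Chars.isdigit xs[j] = false)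
    (hdig : PySem.Chars.isdigit xs[d] = true) :
    fnsDigitScan (PySem.List.enumerate xs st) = some (st + d + 1, fnsDigitValB xs[d]) := by
  induction xs generalizing st d with
  | nil => simp at hd
  | cons c rest ih =>
    show fnsDigitScan ((st, c) :: PySem.List.enumerate rest (st + 1)) = _
    rw [fnsDigitScan]
    cases d with
    | zero =>
      rw [if_pos (by simpa using hdig)]
      simp
    | succ d' =>
      have h0 : PySem.Chars.isdigit c = false := by
        simpa using hbefore 0 (Nat.succ_pos d') (by simp)
      rw [if_neg (by simp [h0])]
      have hrec := ih (st + 1) d' (by simp at hd; omega)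
        (fun j hj hjl => by simpa using hbefore (j + 1) (by omega) (by simp; omega))
        (by simpa using hdig)
      rw [hrec]
      simp only [List.getElem_cons_succ, Option.some.injEq, Prod.mk.injEq]
      refine ⟨by push_cast; ring, ?_⟩
      simp

theorem ds_ge (xs : List Char) (st : Int) (q : Int × Int)
    (hq : fnsDigitScan (PySem.List.enumerate xs st) = some q) :
    ∀ m : Nat, (∀ j (hj : j < m) (hjl : j < xs.length), PySem.Chars.isdigit xs[j] = false) →
      st + m < q.1 := by
  induction xs generalizing st with
  | nil => simp [PySem.List.enumerate, fnsDigitScan] at hq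
  | cons c rest ih =>
    rw [show PySem.List.enumerate (c :: rest) st = (st, c) :: PySem.List.enumerate rest (st + 1) from rfl,
        fnsDigitScan] at hq
    by_cases hdc : PySem.Chars.isdigit c = true
    · rw [if_pos hdc] at hq
      intro m hm
      have hq1 : q.1 = st + 1 := by
        have := (Option.some.inj hq).symm
        rw [this]
      cases m with
      | zero => omega
      | succ m' =>
        have := hm 0 (Nat.succ_pos m') (by simp)
        simp at this
        exact absurd hdc (by simp [this])
    · rw [if_neg hdc] at hq
      intro m hm
      cases m with
      | zero =>
        have := ih (st + 1) hq 0 (by omega)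
        push_cast at this ⊢
        omega
      | succ m' =>
        have := ih (st + 1) hq m'
          (fun j hj hjl => by simpa using hm (j + 1) (by omega) (by simp; omega))
        push_cast at this ⊢
        omega

-- ---- fold (running minimum) lemmas ----

theorem lexLt_iff (a b : Int × Int) :
    fnsLexLt a b = true ↔ (a.1 < b.1 ∨ (a.1 = b.1 ∧ a.2 < b.2)) := by
  simp [fnsLexLt]

theorem lexLe_refl (a : Int × Int) : fnsLexLe a a := Or.inr ⟨rfl, le_refl _⟩

theorem lexLe_trans {a b c : Int × Int} (h1 : fnsLexLe a b) (h2 : fnsLexLe b c) : fnsLexLe a c := by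
  unfold fnsLexLe at *; omega

theorem tokStep_some (s : String) (p : Int × Int) (tv : String × Int) :
    ∃ q, fnsTokStep s (some p) tv = some q ∧ fnsLexLe q p := by
  unfold fnsTokStep
  by_cases hf : PySem.Str.find s tv.1 ≠ -1
  · rw [if_pos hf]
    unfold fnsUpd
    by_cases hlt : fnsLexLt (PySem.Str.find s tv.1 + PySem.Str.len tv.1, tv.2) p = true
    · refine ⟨_, by dsimp only; rw [if_pos hlt], ?_⟩
      have := (lexLt_iff _ _).1 hlt
      unfold fnsLexLe
      omega
    · exact ⟨p, by dsimp only; rw [if_neg hlt], lexLe_refl p⟩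
  · exact ⟨p, by rw [if_neg hf], lexLe_refl p⟩

theorem tokStep_found (s : String) (b0 : Option (Int × Int)) (tv : String × Int)
    (h : PySem.Str.find s tv.1 ≠ -1) :
    ∃ q, fnsTokStep s b0 tv = some q ∧
      fnsLexLe q (PySem.Str.find s tv.1 + PySem.Str.len tv.1, tv.2) := by
  unfold fnsTokStep
  rw [if_pos h]
  cases b0 with
  | none => exact ⟨_, by unfold fnsUpd; rfl, lexLe_refl _⟩
  | some b =>
    unfold fnsUpd
    by_cases hlt : fnsLexLt (PySem.Str.find s tv.1 + PySem.Str.len tv.1, tv.2) b = true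
    · exact ⟨_, by dsimp only; rw [if_pos hlt], lexLe_refl _⟩
    · refine ⟨b, by dsimp only; rw [if_neg hlt], ?_⟩
      have hiff := (lexLt_iff (PySem.Str.find s tv.1 + PySem.Str.len tv.1, tv.2) b)
      unfold fnsLexLe
      have h2 : ¬ ((PySem.Str.find s tv.1 + PySem.Str.len tv.1, tv.2).1 < b.1 ∨
        ((PySem.Str.find s tv.1 + PySem.Str.len tv.1, tv.2).1 = b.1 ∧
         (PySem.Str.find s tv.1 + PySem.Str.len tv.1, tv.2).2 < b.2)) := fun hx => hlt (hiff.2 hx)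
      simp only [not_or, not_and, not_lt] at h2
      simp only []
      omega

theorem tokStep_cases (s : String) (b0 : Option (Int × Int)) (tv : String × Int) (q : Int × Int)
    (h : fnsTokStep s b0 tv = some q) :
    b0 = some q ∨ (PySem.Str.find s tv.1 ≠ -1 ∧
      q = (PySem.Str.find s tv.1 + PySem.Str.len tv.1, tv.2)) := by
  unfold fnsTokStep at h
  by_cases hf : PySem.Str.find s tv.1 ≠ -1
  · rw [if_pos hf] at h
    unfold fnsUpd at h
    cases b0 with
    | none => exact Or.inr ⟨hf, (Option.some.inj h).symm⟩
    | some b =>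
      dsimp only at h
      by_cases hlt : fnsLexLt (PySem.Str.find s tv.1 + PySem.Str.len tv.1, tv.2) b = true
      · rw [if_pos hlt] at h
        exact Or.inr ⟨hf, (Option.some.inj h).symm⟩
      · rw [if_neg hlt] at h
        exact Or.inl (by rw [Option.some.inj h])
  · rw [if_neg hf] at h
    exact Or.inl h

theorem fm1 (s : String) (toks : List (String × Int)) (b0 : Option (Int × Int)) (p : Int × Int)
    (hb : b0 = some p) :
    ∃ q, toks.foldl (fnsTokStep s) b0 = some q ∧ fnsLexLe q p := by
  induction toks generalizing b0 p with
  | nil => exact ⟨p, hb, lexLe_refl p⟩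
  | cons tv rest ih =>
    subst hb
    obtain ⟨q1, hq1, hle1⟩ := tokStep_some s p tv
    obtain ⟨q, hq, hle⟩ := ih (fnsTokStep s (some p) tv) q1 hq1
    exact ⟨q, hq, lexLe_trans hle hle1⟩

theorem fm2 (s : String) (toks : List (String × Int)) (b0 : Option (Int × Int))
    (tv : String × Int) (htv : tv ∈ toks) (h : PySem.Str.find s tv.1 ≠ -1) :
    ∃ q, toks.foldl (fnsTokStep s) b0 = some q ∧
      fnsLexLe q (PySem.Str.find s tv.1 + PySem.Str.len tv.1, tv.2) := by
  induction toks generalizing b0 with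
  | nil => simp at htv
  | cons tv0 rest ih =>
    rw [List.foldl_cons]
    rcases List.mem_cons.1 htv with heq | hmem
    · subst heq
      obtain ⟨q1, hq1, hle1⟩ := tokStep_found s b0 tv h
      obtain ⟨q, hq, hle⟩ := fm1 s rest (fnsTokStep s b0 tv) q1 hq1
      exact ⟨q, hq, lexLe_trans hle hle1⟩
    · exact ih (fnsTokStep s b0 tv0) hmem

theorem fm3 (s : String) (toks : List (String × Int)) (b0 : Option (Int × Int)) (q : Int × Int)
    (h : toks.foldl (fnsTokStep s) b0 = some q) :
    b0 = some q ∨ ∃ tv ∈ toks, PySem.Str.find s tv.1 ≠ -1 ∧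
      q = (PySem.Str.find s tv.1 + PySem.Str.len tv.1, tv.2) := by
  induction toks generalizing b0 with
  | nil => exact Or.inl h
  | cons tv0 rest ih =>
    rcases ih (fnsTokStep s b0 tv0) h with hstep | ⟨tv, htv, hf, hq⟩
    · rcases tokStep_cases s b0 tv0 q hstep with hb | ⟨hf, hq⟩
      · exact Or.inl hb
      · exact Or.inr ⟨tv0, List.mem_cons_self, hf, hq⟩
    · exact Or.inr ⟨tv, List.mem_cons_of_mem _ htv, hf, hq⟩

-- ---- group-scan lemmas ----

theorem grpFind_none (pre : String) (gs : List (String × String × Int))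
    (h : fnsGrpFind pre gs = none) :
    ∀ g ∈ gs, PySem.Str.isIn g.1 pre = false ∧ PySem.Str.isIn g.2.1 pre = false := by
  induction gs with
  | nil => simp
  | cons g0 gs ih =>
    rw [fnsGrpFind] at h
    by_cases hc : (PySem.Str.isIn g0.1 pre || PySem.Str.isIn g0.2.1 pre) = true
    · rw [if_pos hc] at h; exact absurd h (by simp)
    · rw [if_neg hc] at h
      intro g hg
      rcases List.mem_cons.1 hg with heq | hmem
      · subst heq
        simpa using hc
      · exact ih h g hmem

theorem grpFind_some (pre : String) (gs : List (String × String × Int)) (v : Int)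
    (hpw : gs.Pairwise (fun a b => a.2.2 ≤ b.2.2)) (h : fnsGrpFind pre gs = some v) :
    (∃ g ∈ gs, (PySem.Str.isIn g.1 pre || PySem.Str.isIn g.2.1 pre) = true ∧ g.2.2 = v) ∧
      ∀ g ∈ gs, (PySem.Str.isIn g.1 pre || PySem.Str.isIn g.2.1 pre) = true → v ≤ g.2.2 := by
  induction gs with
  | nil => simp [fnsGrpFind] at h
  | cons g0 gs ih =>
    rw [List.pairwise_cons] at hpw
    rw [fnsGrpFind] at h
    by_cases hc : (PySem.Str.isIn g0.1 pre || PySem.Str.isIn g0.2.1 pre) = true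
    · rw [if_pos hc] at h
      have hv : g0.2.2 = v := Option.some.inj h
      refine ⟨⟨g0, List.mem_cons_self, hc, hv⟩, ?_⟩
      intro g hg _
      rcases List.mem_cons.1 hg with heq | hmem
      · subst heq; omega
      · have := hpw.1 g hmem; omega
    · rw [if_neg hc] at h
      obtain ⟨⟨g, hg, hfire, hgv⟩, hmin⟩ := ih hpw.2 h
      refine ⟨⟨g, List.mem_cons_of_mem _ hg, hfire, hgv⟩, ?_⟩
      intro g' hg' hfire'
      rcases List.mem_cons.1 hg' with heq | hmem
      · subst heq; exact absurd hfire' hc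
      · exact hmin g' hmem hfire' 

-- ---- A's step, rephrased through fnsGrpFind (same if-chain) ----

set_option maxHeartbeats 1000000 in
theorem goA_cons (s : String) (i : Int) (c : Char) (rest : List (Int × Char))
    (hd : PySem.Chars.isdigit c = false) :
    fnsGoA s ((i, c) :: rest) =
      match fnsGrpFind (PySem.Str.slice s (some 0) (some (i + 1))) fnsGroups with
      | some v => v
      | none => fnsGoA s rest := by
  rw [fnsGoA, if_pos hd]
  simp only [fnsGrpFind, fnsGroups]
  split_ifs <;> rfl

-- ---- bridging helpers ----

theorem pre_toList (s : String) (k : Nat) :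
    (PySem.Str.slice s (some 0) (some ((k : Int) + 1))).toList = s.toList.take (k + 1) := by
  rw [PySem.Str.toList_slice, PySem.Chars.slice_eq_listSlice]
  rw [show ((k : Int) + 1) = ((k + 1 : Nat) : Int) by push_cast; ring]
  rw [show (0 : Int) = ((0 : Nat) : Int) by norm_num]
  rw [PySem.List.slice_natCast]
  simp

-- a token whose first occurrence ends at position k has its (non-digit) last char at index k
theorem tok_end (s t : String) (k : Nat) (hk : k < s.toList.length)
    (ht : t.toList ≠ [])
    (hnd : t.toList.all (fun c => !PySem.Chars.isdigit c))
    (hne : PySem.Str.find s t ≠ -1)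
    (heq : PySem.Str.find s t + PySem.Str.len t = (k : Int) + 1) :
    PySem.Chars.isdigit s.toList[k] = false := by
  rw [PySem.Str.find_eq] at hne heq
  rw [PySem.Str.len_eq] at heq
  have hge := PySem.Chars.neg_one_le_find s.toList t.toList
  have h0 : 0 ≤ PySem.Chars.find s.toList t.toList := by omega
  obtain ⟨w, hw⟩ := (PySem.Chars.find_spec h0).1
  have htl : 0 < t.toList.length := List.length_pos_iff.2 ht
  have hlen : (PySem.Chars.find s.toList t.toList).toNat + t.toList.length = k + 1 := by omega
  have hb : t.toList.length - 1 < t.toList.length := by omega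
  have hchar : s.toList[k] = t.toList[t.toList.length - 1]'hb := by
    have h1 : s.toList[k] =
        (s.toList.drop (PySem.Chars.find s.toList t.toList).toNat)[t.toList.length - 1]'
          (by rw [List.length_drop]; omega) := by
      rw [List.getElem_drop]
      congr 1
      omega
    rw [h1]
    have h2 : s.toList.drop (PySem.Chars.find s.toList t.toList).toNat =
        t.toList ++ w := hw.symm
    rw [List.getElem_of_eq h2, List.getElem_append_left hb]
  rw [hchar]
  have := List.all_eq_true.1 hnd _ (List.getElem_mem hb)
  simpa using this

-- ---- evaluating B once the fold is known ----

theorem alt_eval (s : String) (q : Int × Int)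
    (h : fnsTokens.foldl (fnsTokStep s) (fnsDigitScan (PySem.List.enumerate s.toList)) = some q) :
    first_num_string_alt s = q.2 := by
  unfold first_num_string_alt
  rw [h]

-- ---- the main induction ----

theorem main_zero (s : String) (k : Nat) (hk : s.toList.length ≤ k)
    (hnd : ∀ j (hj : j < k) (hjl : j < s.toList.length), PySem.Chars.isdigit s.toList[j] = false)
    (hni : ∀ p ∈ fnsTokens, ¬ p.1.toList <:+: s.toList.take k) :
    first_num_string_alt s = 0 := by
  have hb0 : fnsDigitScan (PySem.List.enumerate s.toList) = none := by
    apply ds_none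
    intro c hc
    obtain ⟨j, hj, hcj⟩ := List.mem_iff_getElem.1 hc
    rw [← hcj]
    exact hnd j (by omega) hj
  have hfind : ∀ p ∈ fnsTokens, ¬ PySem.Str.find s p.1 ≠ -1 := by
    intro p hp hne
    have hinf : p.1.toList <:+: s.toList := by
      rw [PySem.Str.find_eq] at hne
      exact (PySem.Chars.find_ne_neg_one_iff _ _).1 hne
    exact hni p hp (by rw [List.take_of_length_le hk]; exact hinf)
  unfold first_num_string_alt
  rcases hfold : fnsTokens.foldl (fnsTokStep s) (fnsDigitScan (PySem.List.enumerate s.toList)) with _ | q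
  · rfl
  · rcases fm3 s fnsTokens _ q hfold with hb | ⟨tv, htv, hf, _⟩
    · rw [hb0] at hb; exact absurd hb (by simp)
    · exact absurd hf (hfind tv htv)

set_option maxHeartbeats 1000000 in
theorem main_aux (s : String) : ∀ m k : Nat, s.toList.length ≤ k + m →
    (∀ j (hj : j < k) (hjl : j < s.toList.length), PySem.Chars.isdigit s.toList[j] = false) →
    (∀ p ∈ fnsTokens, ¬ p.1.toList <:+: s.toList.take k) →
    fnsGoA s (PySem.List.enumerate (s.toList.drop k) k) = first_num_string_alt s := by
  intro m
  induction m with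
  | zero =>
    intro k hk hnd hni
    rw [List.drop_eq_nil_of_le (by omega)]
    exact (main_zero s k (by omega) hnd hni).symm
  | succ m ih =>
    intro k hk hnd hni
    by_cases hkle : s.toList.length ≤ k
    · rw [List.drop_eq_nil_of_le hkle]
      exact (main_zero s k hkle hnd hni).symm
    · have hklt : k < s.toList.length := by omega
      rw [List.drop_eq_getElem_cons hklt]
      rw [show PySem.List.enumerate (s.toList[k] :: s.toList.drop (k + 1)) (k : Int) =
        ((k : Int), s.toList[k]) :: PySem.List.enumerate (s.toList.drop (k + 1)) ((k : Int) + 1)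
        from rfl]
      -- events of all tokens lie beyond step k (nothing completed in the first k steps)
      have hM : ∀ p ∈ fnsTokens, PySem.Str.find s p.1 ≠ -1 →
          (k : Int) + 1 ≤ PySem.Str.find s p.1 + PySem.Str.len p.1 := by
        intro p hp hf
        have hnotk : ¬ (PySem.Str.find s p.1 + PySem.Str.len p.1 ≤ (k : Int)) := by
          intro hle
          exact hni p hp ((infix_take_iff' s p.1 k).2 ⟨hf, hle⟩)
        omega
      by_cases hdig : PySem.Chars.isdigit s.toList[k] = true
      · -- A stops on the digit at index k
        have hA : fnsGoA s (((k : Int), s.toList[k]) ::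
            PySem.List.enumerate (s.toList.drop (k + 1)) ((k : Int) + 1)) =
            fnsDigitValA s.toList[k] := by
          rw [fnsGoA]
          rw [if_neg (by simp [hdig])]
        rw [hA]
        have hb0 := ds_first s.toList 0 k hklt hnd hdig
        have hev : ∀ p ∈ fnsTokens, PySem.Str.find s p.1 ≠ -1 →
            (k : Int) + 1 < PySem.Str.find s p.1 + PySem.Str.len p.1 := by
          intro p hp hf
          have hge := hM p hp hf
          by_contra hcon
          have heq : PySem.Str.find s p.1 + PySem.Str.len p.1 = (k : Int) + 1 := by omega
          have := tok_end s p.1 k hklt (tok_ne_nil p hp) (tok_nondigit p hp) hf heq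
          rw [hdig] at this
          exact absurd this (by simp)
        obtain ⟨q, hfold, hle⟩ := fm1 s fnsTokens _ _ hb0
        have hq : q = (0 + (k : Int) + 1, fnsDigitValB s.toList[k]) := by
          rcases fm3 s fnsTokens _ q hfold with hb | ⟨tv, htv, hf, hqe⟩
          · rw [hb0] at hb
            exact (Option.some.inj hb).symm
          · exfalso
            have h1 := hev tv htv hf
            unfold fnsLexLe at hle
            rw [hqe] at hle
            simp only at hle
            omega
        rw [alt_eval s q hfold, hq]
        rfl
      · -- no digit at index k: A consults its word chain on the prefix of length k+1
        have hd : PySem.Chars.isdigit s.toList[k] = false := by simpa using hdig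
        rw [goA_cons s (k : Int) s.toList[k] _ hd]
        have hpre := pre_toList s k
        have hIn : ∀ t : String,
            PySem.Str.isIn t (PySem.Str.slice s (some 0) (some ((k : Int) + 1))) = true ↔
              t.toList <:+: s.toList.take (k + 1) := by
          intro t
          rw [PySem.Str.isIn_eq, hpre, PySem.Chars.isIn_iff_infix]
        have hnd' : ∀ j (hj : j < k + 1) (hjl : j < s.toList.length),
            PySem.Chars.isdigit s.toList[j] = false := by
          intro j hj hjl
          rcases Nat.lt_succ_iff_lt_or_eq.1 hj with hcase | hcase
          · exact hnd j hcase hjl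
          · subst hcase; exact hd
        cases hgf : fnsGrpFind (PySem.Str.slice s (some 0) (some ((k : Int) + 1))) fnsGroups with
        | none =>
          have hall := grpFind_none _ _ hgf
          have hni' : ∀ p ∈ fnsTokens, ¬ p.1.toList <:+: s.toList.take (k + 1) := by
            intro p hp hinf
            obtain ⟨g, hg, hside, hval⟩ := grp_of_tok p hp
            have h2 := hall g hg
            have h3 := (hIn p.1).2 hinf
            rcases hside with h1 | h1
            · rw [h1] at h3; rw [h2.1] at h3; exact absurd h3 (by simp)
            · rw [h1] at h3; rw [h2.2] at h3; exact absurd h3 (by simp)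
          have hrec := ih (k + 1) (by omega) hnd' hni'
          rw [show ((k : Int) + 1) = ((k + 1 : Nat) : Int) by push_cast; ring]
          exact hrec
        | some v =>
          obtain ⟨⟨g, hg, hfire, hgv⟩, hmin⟩ := grpFind_some _ fnsGroups v grp_pairwise hgf
          -- a token of value v completes exactly at step k+1
          have hex : ∃ p ∈ fnsTokens, p.2 = v ∧ PySem.Str.find s p.1 ≠ -1 ∧
              PySem.Str.find s p.1 + PySem.Str.len p.1 ≤ (k : Int) + 1 := by
            have hmem := tok_of_grp g hg
            rcases Bool.or_eq_true_iff.1 hfire with hside | hside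
            · have hinf := (hIn g.1).1 hside
              obtain ⟨hf, hle⟩ := (infix_take_iff' s g.1 (k + 1)).1 hinf
              exact ⟨(g.1, g.2.2), hmem.1, hgv, hf, by push_cast at hle ⊢; omega⟩
            · have hinf := (hIn g.2.1).1 hside
              obtain ⟨hf, hle⟩ := (infix_take_iff' s g.2.1 (k + 1)).1 hinf
              exact ⟨(g.2.1, g.2.2), hmem.2, hgv, hf, by push_cast at hle ⊢; omega⟩
          obtain ⟨p0, hp0, hp0v, hp0f, hp0le⟩ := hex
          have hp0eq : PySem.Str.find s p0.1 + PySem.Str.len p0.1 = (k : Int) + 1 :=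
            le_antisymm hp0le (hM p0 hp0 hp0f)
          obtain ⟨q, hfold, hle⟩ := fm2 s fnsTokens (fnsDigitScan (PySem.List.enumerate s.toList)) p0 hp0 hp0f
          rw [hp0eq, hp0v] at hle
          have hq2 : q.2 = v := by
            rcases fm3 s fnsTokens (fnsDigitScan (PySem.List.enumerate s.toList)) q hfold with hb | ⟨tv, htv, hf, hqe⟩
            · exfalso
              rcases hscan : fnsDigitScan (PySem.List.enumerate s.toList) with _ | q0
              · rw [hscan] at hb; exact absurd hb (by simp)
              · rw [hscan] at hb
                have hq0 : q0 = q := Option.some.inj hb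
                have hgt := ds_ge s.toList 0 q0 hscan (k + 1) hnd'
                unfold fnsLexLe at hle
                rw [hq0] at hgt
                push_cast at hgt
                omega
            · have hge := hM tv htv hf
              have hinf : tv.1.toList <:+: s.toList.take (k + 1) := by
                apply (infix_take_iff' s tv.1 (k + 1)).2
                refine ⟨hf, ?_⟩
                unfold fnsLexLe at hle
                rw [hqe] at hle
                simp only at hle
                push_cast
                omega
              obtain ⟨g', hg', hside', hval'⟩ := grp_of_tok tv htv
              have hfire' : (PySem.Str.isIn g'.1 (PySem.Str.slice s (some 0) (some ((k : Int) + 1))) ||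
                  PySem.Str.isIn g'.2.1 (PySem.Str.slice s (some 0) (some ((k : Int) + 1)))) = true := by
                rcases hside' with h1 | h1
                · rw [← h1]
                  rw [(hIn tv.1).2 hinf]
                  simp
                · rw [← h1]
                  rw [(hIn tv.1).2 hinf]
                  simp
              have hvle := hmin g' hg' hfire'
              rw [← hval'] at hvle
              unfold fnsLexLe at hle
              rw [hqe] at hle
              simp only at hle
              rw [hqe]
              simp only
              omega
          rw [alt_eval s q hfold, hq2]

theorem fns_main (s : String) : first_num_string s = first_num_string_alt s := by
  have h := main_aux s s.toList.length 0 (by omega)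
    (fun j hj _ => absurd hj (Nat.not_lt_zero j))
    (by
      intro p hp hinf
      rw [List.take_zero] at hinf
      exact tok_ne_nil p hp (List.infix_nil.1 hinf))
  unfold first_num_string
  simpa using h

-- ===== VERDICT (by name: the statement is the Claim_ definition above) =====
theorem first_num_string_spec : Claim_equal_first_num_string := by
  intro s _
  unfold Spec_first_num_string
  exact fns_main s
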